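-- pv_equiv track=rewrite | github.com/jywang99/leet-company | amazon/medium3.py | numberOfWays
-- ===== SOURCE A (Python) =====
-- def numberOfWays(s: str) -> int:
--     c0 = c1 = 0
--     t0 = t1 = 0
--     for c in s:
--         if c == "0":
--             t0 += 1
--         else:
--             t1 += 1
--
--     rs = 0
--     for c in s:
--         if c == "0":
--             c0 += 1
--             rs += c1 * (t1 - c1)
--         else:
--             c1 += 1
--             rs += c0 * (t0 - c0)
--
--     return rs
-- ===== SOURCE B (Python) =====
-- def numberOfWays(s: str) -> int:
--     c0 = c1 = c01 = c10 = c010 = c101 = 0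
--     for c in s:
--         if c == "0":
--             c010 += c01
--             c10 += c1
--             c0 += 1
--         else:
--             c101 += c10
--             c01 += c0
--             c1 += 1
--     return c010 + c101
-- ===== Notes on version B (the rewrite author's own statement) =====
-- stated objective: alternative
-- what changed: Replaces A's two-pass scheme (precompute total 0/1 counts, then sum middle-element products c1*(t1-c1)/c0*(t0-c0)) with a single-pass subsequence DP maintaining six counters (singles, 01/10 pairs, 010/101 triples) and returning c010+c101.
import Mathlib
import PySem

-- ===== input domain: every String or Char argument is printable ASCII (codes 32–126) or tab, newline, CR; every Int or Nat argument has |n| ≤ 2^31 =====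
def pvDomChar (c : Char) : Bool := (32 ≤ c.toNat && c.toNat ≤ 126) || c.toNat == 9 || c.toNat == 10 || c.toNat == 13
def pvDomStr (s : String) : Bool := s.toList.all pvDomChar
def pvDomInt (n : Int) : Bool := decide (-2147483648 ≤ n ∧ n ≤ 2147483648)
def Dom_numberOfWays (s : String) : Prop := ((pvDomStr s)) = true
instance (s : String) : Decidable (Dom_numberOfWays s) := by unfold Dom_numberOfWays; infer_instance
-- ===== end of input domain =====

-- B replaces A's two-pass totals-and-products scheme by a one-pass six-counter subsequence DP (alternative decomposition, same cost).

-- ===== PORT A =====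
-- first loop of A: count '0's into t0 and everything else into t1
def nwCountLoop : List Char → Int × Int → Int × Int
  | [], t => t
  | c :: cs, (t0, t1) =>
    if c = '0' then nwCountLoop cs (t0 + 1, t1) else nwCountLoop cs (t0, t1 + 1)

-- second loop of A: running counts c0/c1 and accumulator rs
def nwLoop2 : List Char → Int → Int → Int → Int → Int → Int
  | [], _, _, _, _, rs => rs
  | c :: cs, t0, t1, c0, c1, rs =>
    if c = '0' then nwLoop2 cs t0 t1 (c0 + 1) c1 (rs + c1 * (t1 - c1))
    else nwLoop2 cs t0 t1 c0 (c1 + 1) (rs + c0 * (t0 - c0))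

def numberOfWays (s : String) : Int :=
  let (t0, t1) := nwCountLoop s.toList (0, 0)
  nwLoop2 s.toList t0 t1 0 0 0

-- ===== PORT B =====
-- single pass; state (c0, c1, c01, c10, c010, c101)
def nwAltLoop : List Char → Int × Int × Int × Int × Int × Int → Int × Int × Int × Int × Int × Int
  | [], st => st
  | c :: cs, (c0, c1, c01, c10, c010, c101) =>
    if c = '0' then nwAltLoop cs (c0 + 1, c1, c01, c10 + c1, c010 + c01, c101)
    else nwAltLoop cs (c0, c1 + 1, c01 + c0, c10, c010, c101 + c10)

def numberOfWays_alt (s : String) : Int :=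
  let (_, _, _, _, c010, c101) := nwAltLoop s.toList (0, 0, 0, 0, 0, 0)
  c010 + c101

-- ===== PRECONDITION & SPEC =====
def Spec_numberOfWays (s : String) (out : Int) : Prop := out = numberOfWays_alt s
instance (s : String) (out : Int) : Decidable (Spec_numberOfWays s out) := by unfold Spec_numberOfWays; infer_instance

-- ===== CLAIM (what is proved, stated in full; the proofs are below) =====
def Claim_equal_numberOfWays : Prop := ∀ (s : String), Dom_numberOfWays s → Spec_numberOfWays s (numberOfWays s)

-- ===== LEMMAS AND PROOFS =====
-- counting helpers used only by the proofs
def nwZeros : List Char → Int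
  | [] => 0
  | c :: cs => (if c = '0' then 1 else 0) + nwZeros cs

def nwOnes : List Char → Int
  | [] => 0
  | c :: cs => (if c = '0' then 0 else 1) + nwOnes cs

-- number of "01" subsequences (a '0' strictly before a non-'0')
def nwP01 : List Char → Int
  | [] => 0
  | c :: cs => (if c = '0' then nwOnes cs else 0) + nwP01 cs

def nwP10 : List Char → Int
  | [] => 0
  | c :: cs => (if c = '0' then 0 else nwZeros cs) + nwP10 cs

def nwT010 : List Char → Int
  | [] => 0
  | c :: cs => (if c = '0' then nwP10 cs else 0) + nwT010 cs

def nwT101 : List Char → Int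
  | [] => 0
  | c :: cs => (if c = '0' then 0 else nwP01 cs) + nwT101 cs

theorem nwCountLoop_eq (l : List Char) (t0 t1 : Int) :
    nwCountLoop l (t0, t1) = (t0 + nwZeros l, t1 + nwOnes l) := by
  induction l generalizing t0 t1 with
  | nil => simp [nwCountLoop, nwZeros, nwOnes]
  | cons c cs ih =>
    by_cases h : c = '0' <;>
      simp [nwCountLoop, nwZeros, nwOnes, h, ih] <;> ring

theorem nwLoop2_eq (l : List Char) (c0 c1 rs t0 t1 : Int)
    (h0 : t0 = c0 + nwZeros l) (h1 : t1 = c1 + nwOnes l) :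
    nwLoop2 l t0 t1 c0 c1 rs
      = rs + c1 * nwP01 l + c0 * nwP10 l + nwT010 l + nwT101 l := by
  induction l generalizing c0 c1 rs with
  | nil => simp [nwLoop2, nwP01, nwP10, nwT010, nwT101]
  | cons c cs ih =>
    by_cases h : c = '0'
    · simp only [nwLoop2, h, if_pos]
      rw [ih (c0 + 1) c1 _ (by simp [nwZeros, h] at h0; omega)
            (by simp [nwOnes, h] at h1; omega)]
      simp [nwP01, nwP10, nwT010, nwT101]
      have : t1 - c1 = nwOnes cs := by simp [nwOnes, h] at h1; omega
      rw [this]; ring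
    · simp only [nwLoop2, h, if_false]
      rw [ih c0 (c1 + 1) _ (by simp [nwZeros, h] at h0; omega)
            (by simp [nwOnes, h] at h1; omega)]
      simp [nwP01, nwP10, nwT010, nwT101, h]
      have : t0 - c0 = nwZeros cs := by simp [nwZeros, h] at h0; omega
      rw [this]; ring

theorem nwAltLoop_eq (l : List Char) (c0 c1 c01 c10 c010 c101 : Int) :
    nwAltLoop l (c0, c1, c01, c10, c010, c101)
      = (c0 + nwZeros l, c1 + nwOnes l,
         c01 + c0 * nwOnes l + nwP01 l,
         c10 + c1 * nwZeros l + nwP10 l,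
         c010 + c01 * nwZeros l + c0 * nwP10 l + nwT010 l,
         c101 + c10 * nwOnes l + c1 * nwP01 l + nwT101 l) := by
  induction l generalizing c0 c1 c01 c10 c010 c101 with
  | nil => simp [nwAltLoop, nwZeros, nwOnes, nwP01, nwP10, nwT010, nwT101]
  | cons c cs ih =>
    by_cases h : c = '0' <;>
      simp [nwAltLoop, h, ih, nwZeros, nwOnes, nwP01, nwP10, nwT010, nwT101] <;>
      refine ⟨by ring, by ring, by ring, by ring, by ring⟩

-- ===== VERDICT (by name: the statement is the Claim_ definition above) =====
theorem numberOfWays_spec : Claim_equal_numberOfWays := by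
  intro s _
  show numberOfWays s = numberOfWays_alt s
  unfold numberOfWays numberOfWays_alt
  rw [nwCountLoop_eq, nwAltLoop_eq]
  simp only
  rw [nwLoop2_eq s.toList 0 0 0 _ _ (by ring) (by ring)]
  ring
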